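-- pv_equiv track=rewrite | github.com/jayden-ong/LeetCode | greedy/minimum-number-of-pushes-to-type-word-i.py | minimumPushes
-- ===== SOURCE A (Python) =====
-- def minimumPushes(word: str) -> int:
--     word_length = len(word)
--     answer = 0
--     curr = 1
--     while word_length > 0:
--         answer += min(8, word_length) * curr
--         word_length -= min(8, word_length)
--         curr += 1
--     return answer
-- ===== SOURCE B (Python) =====
-- def minimumPushes(word: str) -> int:
--     full, rem = divmod(len(word), 8)
--     return 4 * full * (full + 1) + rem * (full + 1)
-- ===== Notes on version B (the rewrite author's own statement) =====
-- stated objective: simpler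
-- what changed: Replaced the while loop that peels off up to 8 characters per tier with a closed-form divmod formula: 4*full*(full+1) + rem*(full+1).
import Mathlib
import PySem

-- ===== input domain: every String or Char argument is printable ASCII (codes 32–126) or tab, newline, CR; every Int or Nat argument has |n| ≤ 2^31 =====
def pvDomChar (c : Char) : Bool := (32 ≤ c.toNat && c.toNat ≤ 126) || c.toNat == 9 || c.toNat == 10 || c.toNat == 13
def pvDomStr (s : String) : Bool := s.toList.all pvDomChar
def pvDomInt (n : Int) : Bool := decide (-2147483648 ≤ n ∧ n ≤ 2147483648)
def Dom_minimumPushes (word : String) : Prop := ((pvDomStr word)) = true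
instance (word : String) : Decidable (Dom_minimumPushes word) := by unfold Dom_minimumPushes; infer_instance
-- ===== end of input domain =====

-- B replaces A's tier-peeling while loop by a closed-form divmod formula (simpler, O(1)).

-- ===== PORT A =====
-- while word_length > 0: answer += min(8, word_length)*curr; word_length -= min(8, word_length); curr += 1
def pushLoop (wl answer curr : Int) : Int :=
  if h : wl > 0 then
    pushLoop (wl - min 8 wl) (answer + min 8 wl * curr) (curr + 1)
  else answer
termination_by wl.toNat
decreasing_by omega

def minimumPushes (word : String) : Int :=
  pushLoop (PySem.Str.len word) 0 1

-- ===== PORT B =====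
def minimumPushes_alt (word : String) : Int :=
  let n := PySem.Str.len word
  let full := PySem.Int.floordiv n 8
  let rem := PySem.Int.mod n 8
  4 * full * (full + 1) + rem * (full + 1)

-- ===== PRECONDITION & SPEC =====
def Spec_minimumPushes (word : String) (out : Int) : Prop := out = minimumPushes_alt word
instance (word : String) (out : Int) : Decidable (Spec_minimumPushes word out) := by unfold Spec_minimumPushes; infer_instance

-- ===== CLAIM (what is proved, stated in full; the proofs are below) =====
def Claim_equal_minimumPushes : Prop := ∀ (word : String), Dom_minimumPushes word → Spec_minimumPushes word (minimumPushes word)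

-- ===== LEMMAS AND PROOFS =====
theorem pushLoop_closed (n : Nat) (a c : Int) :
    pushLoop (n : Int) a c =
      a + 4 * ((n / 8 : Nat) : Int) * (((n / 8 : Nat) : Int) + 1)
        + ((n % 8 : Nat) : Int) * (((n / 8 : Nat) : Int) + 1)
        + (c - 1) * (n : Int) := by
  induction n using Nat.strong_induction_on generalizing a c with
  | _ n ih =>
    rw [pushLoop]
    by_cases h0 : (n : Int) > 0
    · simp only [h0, dif_pos]
      by_cases h8 : n ≤ 8
      · -- one final iteration: min 8 n = n
        have hmin : min (8 : Int) (n : Int) = (n : Int) := by omega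
        rw [hmin]
        have hz : (n : Int) - (n : Int) = ((0 : Nat) : Int) := by omega
        rw [hz, pushLoop]
        simp only [show ¬ ((0:Nat):Int) > 0 by decide, dif_neg, not_false_iff]
        by_cases h8' : n = 8
        · subst h8'; norm_num; ring
        · have hdiv : n / 8 = 0 := by omega
          have hmod : n % 8 = n := by omega
          rw [hdiv, hmod]; push_cast; ring
      · -- n > 8 : min 8 n = 8
        have hmin : min (8 : Int) (n : Int) = 8 := by omega
        rw [hmin]
        have hsub : (n : Int) - 8 = ((n - 8 : Nat) : Int) := by omega
        rw [hsub, ih (n - 8) (by omega)]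
        have hdiv : (n - 8) / 8 = n / 8 - 1 := by omega
        have hmod : (n - 8) % 8 = n % 8 := by omega
        have hpos : 1 ≤ n / 8 := by omega
        rw [hdiv, hmod]
        have hc : (((n / 8 - 1 : Nat)) : Int) = ((n / 8 : Nat) : Int) - 1 := by
          omega
        rw [hc]
        rw [show ((n - 8 : Nat) : Int) = 8 * ((n / 8 : Nat) : Int) + ((n % 8 : Nat) : Int) - 8 from by omega]
        rw [show ((n : Nat) : Int) = 8 * ((n / 8 : Nat) : Int) + ((n % 8 : Nat) : Int) from by omega]
        ring
    · simp only [h0, dif_neg, not_false_iff]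
      have hn : n = 0 := by omega
      subst hn; norm_num

theorem minimumPushes_eq_alt (word : String) :
    minimumPushes word = minimumPushes_alt word := by
  unfold minimumPushes minimumPushes_alt
  rw [PySem.Str.len_eq]
  rw [pushLoop_closed]
  have h1 : PySem.Int.floordiv ((word.toList.length : Nat) : Int) 8
      = ((word.toList.length / 8 : Nat) : Int) := by
    rw [PySem.Int.floordiv_eq_ediv_of_pos (by norm_num)]
    exact (Int.natCast_div _ _).symm
  have h2 : PySem.Int.mod ((word.toList.length : Nat) : Int) 8
      = ((word.toList.length % 8 : Nat) : Int) := by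
    rw [PySem.Int.mod_eq_emod_of_pos (by norm_num)]
    exact (Int.natCast_mod _ _).symm
  simp only [h1, h2]
  ring

-- ===== VERDICT (by name: the statement is the Claim_ definition above) =====
theorem minimumPushes_spec : Claim_equal_minimumPushes := by
  intro word _
  exact minimumPushes_eq_alt word
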